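-- pv_equiv track=rewrite | github.com/pypi-data/pypi-mirror-206 | packages/forbidden/forbidden-9.7-py3-none-any.whl/forbidden/forbidden.py | get_directories
-- ===== SOURCE A (Python) =====
-- def unique(sequence):
-- 	seen = set()
-- 	return [x for x in sequence if not (x in seen or seen.add(x))]
--
-- def get_directories(path = None):
-- 	const = "/"
-- 	tmp = [const]
-- 	if path:
-- 		dir_no_const = ""
-- 		dir_const = const
-- 		for entry in path.split(const):
-- 			if entry:
-- 				dir_no_const += const + entry
-- 				dir_const += entry + const
-- 				tmp.extend([dir_no_const, dir_const])
-- 	return unique(tmp)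
-- ===== SOURCE B (Python) =====
-- def unique(sequence):
-- 	seen = set()
-- 	return [x for x in sequence if not (x in seen or seen.add(x))]
--
-- def get_directories(path = None):
-- 	# Normalize to one canonical slash-terminated string, then emit a slice
-- 	# at every slash position: s[:i] (inner boundary) and s[:i+1] (with slash).
-- 	parts = [p for p in path.split("/") if p] if path else []
-- 	s = "/" + "/".join(parts) + ("/" if parts else "")
-- 	out = []
-- 	for i, c in enumerate(s):
-- 		if c == "/":
-- 			if i:
-- 				out.append(s[:i])
-- 			out.append(s[:i + 1])
-- 	return unique(out)
-- ===== Notes on version B (the rewrite author's own statement) =====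
-- stated objective: alternative
-- what changed: Instead of A's loop with two parallel string accumulators appending pairs, B first normalizes the path into one canonical slash-terminated string and then scans that string once, emitting a prefix slice s[:i] and s[:i+1] at every slash position.
import Mathlib
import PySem

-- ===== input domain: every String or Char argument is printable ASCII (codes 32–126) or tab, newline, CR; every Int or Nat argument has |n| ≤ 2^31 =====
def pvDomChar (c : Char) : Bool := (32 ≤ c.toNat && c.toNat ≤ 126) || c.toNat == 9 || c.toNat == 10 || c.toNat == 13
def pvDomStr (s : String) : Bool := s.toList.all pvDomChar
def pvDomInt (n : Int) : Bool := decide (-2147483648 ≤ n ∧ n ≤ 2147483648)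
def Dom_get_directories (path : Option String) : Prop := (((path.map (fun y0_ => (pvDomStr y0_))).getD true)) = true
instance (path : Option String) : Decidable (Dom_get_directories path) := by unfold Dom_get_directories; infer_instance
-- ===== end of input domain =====

-- B normalizes the path into one canonical slash-terminated string and emits prefix slices
-- at each slash position, instead of A's loop with two parallel string accumulators
-- (objective: alternative algorithm, same behaviour).

-- shared helper: the module-level 'unique' both Pythons call (seen-set filter, first occurrences)
def pyUnique (sequence : List String) : List String :=
  (sequence.foldl
    (fun (st : PySem.Set String × List String) x =>
      if PySem.Set.contains st.1 x then st
      else (PySem.Set.add st.1 x, st.2 ++ [x]))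
    (PySem.Set.empty, [])).2

-- ===== PORT A =====
def get_directories (path : Option String) : List String :=
  let const : String := "/"
  let tmp : List String := [const]
  let tmp :=
    match path with
    | none => tmp
    | some p =>
      if p ≠ "" then
        (((PySem.Str.split? p const).getD []).foldl
          (fun (st : List String × String × String) entry =>
            if entry ≠ "" then
              let dir_no_const := st.2.1 ++ const ++ entry
              let dir_const := st.2.2 ++ entry ++ const
              (st.1 ++ [dir_no_const, dir_const], dir_no_const, dir_const)
            else st)
          (tmp, "", const)).1
      else tmp
  pyUnique tmp

-- ===== PORT B =====
def get_directories_alt (path : Option String) : List String :=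
  -- parts = [p for p in path.split("/") if p] if path else []
  let parts : List String :=
    match path with
    | none => []
    | some p => if p ≠ "" then ((PySem.Str.split? p "/").getD []).filter (fun x => x ≠ "") else []
  -- s = "/" + "/".join(parts) + ("/" if parts else "")
  let s : String := "/" ++ PySem.Str.join "/" parts ++ (if parts ≠ [] then "/" else "")
  -- for i, c in enumerate(s): if c == "/": (if i: append s[:i]); append s[:i+1]
  let out : List String :=
    (PySem.List.enumerate s.toList 0).foldl
      (fun (out : List String) ic =>
        if ic.2 = '/' then
          (out ++ (if ic.1 ≠ 0 then [PySem.Str.slice s none (some ic.1)] else []))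
            ++ [PySem.Str.slice s none (some (ic.1 + 1))]
        else out) []
  pyUnique out

-- ===== PRECONDITION & SPEC =====
def Spec_get_directories (path : Option String) (out : List String) : Prop := out = get_directories_alt path
instance (path : Option String) (out : List String) : Decidable (Spec_get_directories path out) := by unfold Spec_get_directories; infer_instance

-- ===== CLAIM (what is proved, stated in full; the proofs are below) =====
def Claim_equal_get_directories : Prop := ∀ (path : Option String), Dom_get_directories path → Spec_get_directories path (get_directories path)

-- ===== LEMMAS AND PROOFS =====

-- A's loop step (two parallel accumulators)
def stepA (st : List String × String × String) (entry : String) : List String × String × String :=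
  if entry ≠ "" then
    let dir_no_const := st.2.1 ++ "/" ++ entry
    let dir_const := st.2.2 ++ entry ++ "/"
    (st.1 ++ [dir_no_const, dir_const], dir_no_const, dir_const)
  else st

def filt (l : List String) : List String := l.filter (fun x => x ≠ "")

theorem splitOn_go_no_sep (c : Char) :
    ∀ (fuel : Nat) (l cur : List Char) (acc : List (List Char)),
      l.length ≤ fuel → c ∉ cur → (∀ q ∈ acc, c ∉ q) →
      ∀ p ∈ PySem.Chars.splitOn.go [c] fuel l cur acc, c ∉ p := by
  intro fuel
  induction fuel with
  | zero =>
    intro l cur acc hlen hcur hacc p hp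
    have hl : l = [] := List.length_eq_zero_iff.mp (by omega)
    subst hl
    rw [PySem.Chars.splitOn.go] at hp
    simp at hp
    rcases hp with hp | hp
    · exact hacc p hp
    · subst hp; simpa using hcur
  | succ fuel ih =>
    intro l cur acc hlen hcur hacc p hp
    cases l with
    | nil =>
      rw [PySem.Chars.splitOn.go] at hp
      simp at hp
      rcases hp with hp | hp
      · exact hacc p hp
      · subst hp; simpa using hcur
      · omega
    | cons c' rest =>
      rw [PySem.Chars.splitOn.go] at hp
      by_cases hpre : List.isPrefixOf [c] (c' :: rest)
      · rw [if_pos hpre] at hp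
        exact ih (List.drop 1 (c' :: rest)) [] (cur.reverse :: acc)
          (by simp at hlen ⊢; omega) (by simp)
          (by intro q hq; rcases List.mem_cons.mp hq with h | h
              · subst h; simpa using hcur
              · exact hacc q h) p hp
      · rw [if_neg hpre] at hp
        have hne : c ≠ c' := by
          intro h; apply hpre; subst h; simp [List.isPrefixOf]
        exact ih rest (c' :: cur) acc (by simp at hlen ⊢; omega)
          (by simp [hcur, hne]) hacc p hp

theorem split_no_sep (s : List Char) (c : Char) :
    ∀ p ∈ PySem.Chars.splitOn s [c], c ∉ p := by
  intro p hp
  exact splitOn_go_no_sep c (s.length + 1) s [] [] (by omega) (by simp) (by simp) p hp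

def stepScan (s : String) (out : List String) (ic : Int × Char) : List String :=
  if ic.2 = '/' then
    (out ++ (if ic.1 ≠ 0 then [PySem.Str.slice s none (some ic.1)] else []))
      ++ [PySem.Str.slice s none (some (ic.1 + 1))]
  else out

def F (ps : List String) : List Char := ps.flatMap (fun p => '/' :: p.toList)

def prefsS (ps : List String) : List String :=
  (List.range ps.length).map (fun i => String.ofList (F (ps.take (i + 1))))

def pair (d : String) : List String := [d, d ++ "/"]

theorem F_append (q : List String) (p : String) :
    F (q ++ [p]) = F q ++ '/' :: p.toList := by simp [F]

theorem prefsS_append (q : List String) (p : String) :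
    prefsS (q ++ [p]) = prefsS q ++ [String.ofList (F (q ++ [p]))] := by
  unfold prefsS
  rw [List.length_append, List.length_singleton, List.range_succ, List.map_append]
  congr 1
  · apply List.map_congr_left
    intro i hi
    rw [List.mem_range] at hi
    rw [List.take_append_of_le_length (by omega)]
  · simp [List.take_of_length_le (by simp : (q ++ [p]).length ≤ q.length + 1)]

theorem slice_str (s : String) (k : Nat) :
    PySem.Str.slice s none (some (k : Int)) = String.ofList (s.toList.take k) := by
  apply String.toList_inj.mp
  simp [PySem.Str.toList_slice, PySem.List.slice_to_natCast]

theorem stepScan_congr (s1 s2 : String) (u : List Char) (h : s2.toList = s1.toList ++ u) :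
    ∀ (out : List String), ∀ ic ∈ PySem.List.enumerate s1.toList 0,
      stepScan s2 out ic = stepScan s1 out ic := by
  intro out ic hic
  rw [PySem.List.mem_enumerate_iff] at hic
  obtain ⟨k, hk, rfl⟩ := hic
  unfold stepScan
  by_cases hc : s1.toList[k] = '/'
  · simp only [hc, if_true]
    rw [show ((0 : Int) + (k : Int) + 1) = (((k + 1) : Nat) : Int) from by push_cast; ring,
      show ((0 : Int) + (k : Int)) = ((k : Nat) : Int) from by ring,
      slice_str, slice_str, slice_str, slice_str, h,
      List.take_append_of_le_length (by omega), List.take_append_of_le_length (by omega)]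
  · simp [hc]

theorem scan_skip (s : String) (cs : List Char) (h : '/' ∉ cs) :
    ∀ (k : Int) (out : List String),
      (PySem.List.enumerate cs k).foldl (stepScan s) out = out := by
  induction cs with
  | nil => intro k out; simp [PySem.List.enumerate]
  | cons c rest ih =>
    intro k out
    rw [PySem.List.enumerate_cons, List.foldl_cons]
    have hc : c ≠ '/' := fun he => h (he ▸ List.mem_cons_self)
    rw [show stepScan s out (k, c) = out from by simp [stepScan, hc]]
    exact ih (fun hm => h (List.mem_cons_of_mem _ hm)) (k + 1) out

theorem scan_spec : ∀ (ps : List String), (∀ p ∈ ps, '/' ∉ p.toList) →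
    ∀ (s : String), s.toList = F ps ++ ['/'] →
    (PySem.List.enumerate s.toList 0).foldl (stepScan s) [] = "/" :: (prefsS ps).flatMap pair := by
  intro ps
  induction ps using List.reverseRecOn with
  | nil =>
    intro _ s hs
    rw [hs]
    show stepScan s [] (0, '/') = _
    rw [stepScan]
    norm_num
    rw [show ((1 : Int)) = ((1 : Nat) : Int) from by norm_num, slice_str, hs]
    simp [prefsS]
    rfl
  | append_singleton ps p ih =>
    intro hns s hs
    have hnp : '/' ∉ p.toList := hns p (List.mem_append_right _ List.mem_cons_self)
    have hns' : ∀ q ∈ ps, '/' ∉ q.toList := fun q hq => hns q (List.mem_append_left _ hq)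
    have hsl : s.toList = (F ps ++ ['/']) ++ (p.toList ++ ['/']) := by
      rw [hs, F_append]; simp
    have hs1 : (String.ofList (F ps ++ ['/'])).toList = F ps ++ ['/'] := String.toList_ofList
    set s1 := String.ofList (F ps ++ ['/']) with hs1def
    rw [show s.toList = s1.toList ++ (p.toList ++ ['/']) from by rw [hs1, hsl]]
    rw [PySem.List.enumerate_append, List.foldl_append]
    rw [PySem.List.foldl_congr_mem _ _ (stepScan s1) _
      (fun out ic hic => stepScan_congr s1 s (p.toList ++ ['/']) (by rw [hs1, hsl]) out ic hic)]
    rw [ih hns' s1 hs1]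
    rw [PySem.List.enumerate_append, List.foldl_append]
    rw [scan_skip s p.toList hnp]
    show stepScan s _ (_, '/') = _
    rw [stepScan]
    simp only [if_true]
    have hlen : s1.toList.length = (F ps).length + 1 := by rw [hs1]; simp
    have hne : (0 : Int) + (s1.toList.length : Int) + (p.toList.length : Int) ≠ 0 := by
      rw [hlen]; push_cast; omega
    rw [if_pos hne]
    have e2 : (0 : Int) + (s1.toList.length : Int) + (p.toList.length : Int) + 1
        = ((s1.toList.length + p.toList.length + 1 : Nat) : Int) := by push_cast; ring
    have e1 : (0 : Int) + (s1.toList.length : Int) + (p.toList.length : Int)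
        = ((s1.toList.length + p.toList.length : Nat) : Int) := by push_cast; ring
    rw [e2, e1, slice_str, slice_str]
    have ht1 : s.toList.take (s1.toList.length + p.toList.length) = F (ps ++ [p]) := by
      rw [show s.toList = (s1.toList ++ p.toList) ++ ['/'] from by rw [hsl, hs1]; simp,
        List.take_append_of_le_length (by simp), List.take_of_length_le (by simp), F_append, hs1]
      simp
    have ht2 : s.toList.take (s1.toList.length + p.toList.length + 1) = F (ps ++ [p]) ++ ['/'] := by
      have hlen2 : ((s1.toList ++ p.toList) ++ ['/']).length = s1.toList.length + p.toList.length + 1 := by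
        rw [List.length_append, List.length_append, List.length_singleton]
      rw [show s.toList = (s1.toList ++ p.toList) ++ ['/'] from by rw [hsl, hs1]; simp,
        List.take_of_length_le (le_of_eq hlen2), hs1, F_append]
      simp
    rw [ht1, ht2, prefsS_append, List.flatMap_append]
    simp only [pair, List.flatMap_cons, List.flatMap_nil]
    have hq : String.ofList (F (ps ++ [p]) ++ ['/']) = String.ofList (F (ps ++ [p])) ++ "/" := by
      apply String.toList_inj.mp; simp
    rw [hq]
    simp

-- the nonempty split entries of A and B name the same list
theorem foldB_eq (l : List String) :
    l.foldl stepA (["/"], "", "/")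
      = (("/" : String) :: (prefsS (filt l)).flatMap pair,
         String.ofList (F (filt l)),
         String.ofList (F (filt l)) ++ "/") := by
  induction l using List.reverseRecOn with
  | nil => decide
  | append_singleton l p ih =>
    rw [List.foldl_append, List.foldl_cons, List.foldl_nil, ih]
    by_cases hp : p = ""
    · simp [stepA, filt, hp]
    · have hfil : filt (l ++ [p]) = filt l ++ [p] := by simp [filt, hp]
      have hc : (String.ofList (F (filt l)) ++ "/") ++ p ++ "/"
          = String.ofList (F (filt l ++ [p])) ++ "/" := by
        apply String.toList_inj.mp; simp [F_append]
      have hnc : String.ofList (F (filt l)) ++ "/" ++ p = String.ofList (F (filt l ++ [p])) := by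
        apply String.toList_inj.mp; simp [F_append]
      simp only [stepA]
      rw [if_pos hp, hfil, prefsS_append, List.flatMap_append]
      refine Prod.ext ?_ (Prod.ext ?_ ?_)
      · show _ ++ [_, _] = _
        rw [hc, hnc]
        simp [pair]
      · exact hnc
      · exact hc

-- every nonempty piece of path.split("/") is slash-free
theorem parts_no_slash (p : String) (x : String)
    (hx : x ∈ ((PySem.Str.split? p "/").getD []).filter (fun x => x ≠ "")) :
    '/' ∉ x.toList := by
  have hx' : x ∈ (PySem.Str.split? p "/").getD [] := List.mem_of_mem_filter hx
  have hmap := PySem.Str.split?_map p "/"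
  cases h : PySem.Str.split? p "/" with
  | none => rw [h] at hx'; simp at hx'
  | some xs =>
    rw [h] at hmap hx'
    have : xs.map String.toList = PySem.Chars.splitOn p.toList ['/'] := by
      have : PySem.Chars.split? p.toList ['/'] = some (PySem.Chars.splitOn p.toList ['/']) := by
        simp [PySem.Chars.split?]
      rw [show ("/" : String).toList = ['/'] from rfl] at hmap
      rw [this] at hmap
      simpa using hmap
    exact split_no_sep p.toList '/' x.toList (this ▸ List.mem_map_of_mem hx')

-- B's normalized string spells out the canonical prefix concatenation
theorem join_eq_F : ∀ (q : List String), q ≠ [] →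
    '/' :: PySem.Chars.join ['/'] (q.map String.toList) = F q := by
  intro q
  induction q with
  | nil => intro h; exact absurd rfl h
  | cons p rest ih =>
    intro _
    cases rest with
    | nil => simp [PySem.Chars.join_singleton, F]
    | cons q' rest' =>
      rw [List.map_cons, List.map_cons, PySem.Chars.join_cons_cons, ← List.map_cons]
      have := ih (by simp)
      rw [show ('/' :: (p.toList ++ ['/'] ++ PySem.Chars.join ['/'] ((q' :: rest').map String.toList)))
          = ('/' :: p.toList) ++ ('/' :: PySem.Chars.join ['/'] ((q' :: rest').map String.toList)) from by simp,
        this]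
      simp [F]

theorem s_toList (q : List String) :
    (("/" : String) ++ PySem.Str.join "/" q ++ (if q ≠ [] then "/" else "")).toList
      = F q ++ ['/'] := by
  by_cases hq : q = []
  · subst hq; decide
  · rw [if_pos hq]
    rw [String.toList_append, String.toList_append, PySem.Str.toList_join]
    rw [show ("/" : String).toList = ['/'] from rfl]
    rw [show (['/'] : List Char) ++ PySem.Chars.join ['/'] (q.map String.toList) ++ ['/']
        = ('/' :: PySem.Chars.join ['/'] (q.map String.toList)) ++ ['/'] from by simp,
      join_eq_F q hq]

-- ===== VERDICT (by name: the statement is the Claim_ definition above) =====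
theorem get_directories_spec : Claim_equal_get_directories := by
  intro path _
  unfold Spec_get_directories get_directories get_directories_alt
  cases path with
  | none => decide
  | some p =>
    by_cases hp : p = ""
    · subst hp; decide
    · simp only [ne_eq, hp, not_false_iff, if_pos]
      show pyUnique (((PySem.Str.split? p "/").getD []).foldl stepA (["/"], "", "/")).1
        = pyUnique
            ((PySem.List.enumerate (("/" : String) ++ PySem.Str.join "/" (filt ((PySem.Str.split? p "/").getD [])) ++ (if filt ((PySem.Str.split? p "/").getD []) ≠ [] then "/" else "")).toList 0).foldl
              (stepScan (("/" : String) ++ PySem.Str.join "/" (filt ((PySem.Str.split? p "/").getD [])) ++ (if filt ((PySem.Str.split? p "/").getD []) ≠ [] then "/" else ""))) [])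
      rw [foldB_eq]
      rw [scan_spec (filt ((PySem.Str.split? p "/").getD []))
        (fun x hx => parts_no_slash p x hx)
        _ (s_toList (filt ((PySem.Str.split? p "/").getD [])))]
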